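-- pv_equiv track=rewrite | github.com/grunet01/CS460 | src/projects/vpn/server.py | select_cipher
-- ===== SOURCE A (Python) =====
-- def select_cipher(supported: dict, proposed: dict) -> tuple[str, int]:
--     """Select a cipher to use
--
--     :param supported: dictionary of ciphers supported by the server
--     :param proposed: dictionary of ciphers proposed by the client
--     :return: tuple (cipher, key_size) of the common cipher where key_size is the longest supported by both
--     :raise: ValueError if there is no (cipher, key_size) combination that both client and server support
--     """
--     best: tuple[str, int] | None = None
--
--     for cipher, sup_keys in supported.items():
--         if cipher not in proposed:
--             continue
--         common = set(sup_keys).intersection(proposed[cipher])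
--         if not common:
--             continue
--         top = max(common)
--         if best is None or top > best[1]:
--             best = (cipher, top)
--
--     if best is None:
--         raise ValueError("Could not agree on a cipher")
--
--     return best
-- ===== SOURCE B (Python) =====
-- def select_cipher(supported: dict, proposed: dict) -> tuple[str, int]:
--     """Select a cipher: flatten to key-level (key, -position, cipher) tuples over
--     the mutually supported keys, then take one lexicographic max.  The -position
--     component makes the earlier supported cipher win ties on equal key size,
--     which is exactly the original strict-'>' tie-break."""
--     pairs = [(key, -i, cipher)
--              for i, (cipher, sup_keys) in enumerate(supported.items())
--              if cipher in proposed
--              for key in sup_keys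
--              if key in proposed[cipher]]
--     if not pairs:
--         raise ValueError("Could not agree on a cipher")
--     key, _neg_i, cipher = max(pairs, key=lambda t: (t[0], t[1]))
--     return (cipher, key)
-- ===== Notes on version B (the rewrite author's own statement) =====
-- stated objective: alternative
-- what changed: Replaces A's per-cipher set-intersection + max(common) + running-best loop with a flat key-level pass: every mutually supported (key, -position, cipher) tuple is listed and a single lexicographic max picks the answer, -position reproducing the earliest-cipher tie-break; no sets and no per-cipher maxima are computed.
import Mathlib
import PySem

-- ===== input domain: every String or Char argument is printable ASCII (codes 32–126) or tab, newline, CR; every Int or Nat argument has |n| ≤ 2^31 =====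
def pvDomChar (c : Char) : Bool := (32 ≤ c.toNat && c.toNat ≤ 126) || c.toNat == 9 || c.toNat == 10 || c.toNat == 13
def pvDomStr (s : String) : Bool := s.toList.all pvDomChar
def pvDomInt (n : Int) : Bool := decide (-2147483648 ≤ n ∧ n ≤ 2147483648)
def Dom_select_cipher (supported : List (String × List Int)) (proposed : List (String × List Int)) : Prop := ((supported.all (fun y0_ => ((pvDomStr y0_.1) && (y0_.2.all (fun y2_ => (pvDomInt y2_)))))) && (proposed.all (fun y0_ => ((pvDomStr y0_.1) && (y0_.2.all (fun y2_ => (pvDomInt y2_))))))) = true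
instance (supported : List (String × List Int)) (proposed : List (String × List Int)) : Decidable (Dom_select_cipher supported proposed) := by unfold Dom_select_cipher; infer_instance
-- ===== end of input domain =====

-- B replaces A's per-cipher set-intersection/max/running-best loop with a flat pass:
-- it lists every mutually supported (key, -position, cipher) tuple and takes one
-- lexicographic max, -position reproducing the earliest-cipher tie-break
-- (objective: alternative algorithm, no sets and no per-cipher maxima).


-- ===== PORT A =====
-- A's single fused loop: best starts at None and is replaced whenever a common cipher
-- has a strictly larger max common key; 'max(common)' is the running-max loop.
def select_cipher (supported : List (String × List Int)) (proposed : List (String × List Int)) : String × Int :=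
  (supported.foldl (fun best p =>
      match PySem.Dict.get? (PySem.Dict.mk proposed) p.1 with
      | none => best                -- 'cipher not in proposed: continue'
      | some pk =>
        match PySem.Set.inter (PySem.Set.ofList p.2) pk with
        | [] => best                -- 'if not common: continue'
        | h :: t =>
          let top := t.foldl max h
          match best with
          | none => some (p.1, top)
          | some b => if top > b.2 then some (p.1, top) else best)
    none).getD ("", 0)              -- best = none: A raises ValueError (outside Pre_)

-- ===== PORT B =====
-- B: the flat comprehension over enumerate(supported.items()) building key-level
-- (key, -i, cipher) tuples, then max(pairs, key=lambda t: (t[0], t[1])).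
def select_cipher_alt (supported : List (String × List Int)) (proposed : List (String × List Int)) : String × Int :=
  let pairs : List (Int × Int × String) :=
    (PySem.List.enumerate supported).flatMap (fun ip =>
      match PySem.Dict.get? (PySem.Dict.mk proposed) ip.2.1 with
      | none => []                  -- 'if cipher in proposed' fails: no tuples
      | some pk => ip.2.2.filterMap (fun k =>
          if pk.contains k then some (k, -ip.1, ip.2.1) else none))
  match PySem.List.max2? pairs (fun t => t.1) (fun t => t.2.1) with
  | none => ("", 0)                 -- 'if not pairs': B raises ValueError (outside Pre_)
  | some t => (t.2.2, t.1)

-- ===== PRECONDITION & SPEC =====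
-- Pre_ excludes exactly the inputs where A raises ValueError ("Could not agree on a
-- cipher"): no supported cipher is also proposed with a common key. B raises there too.
def Pre_select_cipher (supported : List (String × List Int)) (proposed : List (String × List Int)) : Prop :=
  (supported.any (fun p =>
    match PySem.Dict.get? (PySem.Dict.mk proposed) p.1 with
    | none => false
    | some pk => p.2.any (fun k => pk.contains k))) = true
instance (supported : List (String × List Int)) (proposed : List (String × List Int)) : Decidable (Pre_select_cipher supported proposed) := by unfold Pre_select_cipher; infer_instance
def pvWitness_select_cipher : (List (String × List Int)) × (List (String × List Int)) :=
  ([("aes", [128, 256]), ("des", [56])], [("aes", [256, 192])])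

def Spec_select_cipher (supported : List (String × List Int)) (proposed : List (String × List Int)) (out : String × Int) : Prop := out = select_cipher_alt supported proposed
instance (supported : List (String × List Int)) (proposed : List (String × List Int)) (out : String × Int) : Decidable (Spec_select_cipher supported proposed out) := by unfold Spec_select_cipher; infer_instance

-- ===== CLAIM (what is proved, stated in full; the proofs are below) =====
def Claim_equal_select_cipher : Prop := ∀ (supported : List (String × List Int)) (proposed : List (String × List Int)), Dom_select_cipher supported proposed → Pre_select_cipher supported proposed → Spec_select_cipher supported proposed (select_cipher supported proposed)

-- ===== LEMMAS AND PROOFS =====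

-- Proof-local names: A's fused step, B's max2? step, B's per-cipher tuple chunk,
-- and the max common key of one cipher (as A's filter-then-running-max computes it).
def pvS (proposed : List (String × List Int)) (best : Option (String × Int)) (p : String × List Int) : Option (String × Int) :=
  match PySem.Dict.get? (PySem.Dict.mk proposed) p.1 with
  | none => best
  | some pk =>
    match PySem.Set.inter (PySem.Set.ofList p.2) pk with
    | [] => best
    | h :: t =>
      let top := t.foldl max h
      match best with
      | none => some (p.1, top)
      | some b => if top > b.2 then some (p.1, top) else best

def pvStepB (acc : Option (Int × Int × String)) (x : Int × Int × String) : Option (Int × Int × String) :=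
  match acc with
  | none => some x
  | some m => if (decide (m.1 < x.1) || !decide (x.1 < m.1) && decide (m.2.1 < x.2.1)) = true then some x else some m

def pvChunk (i : Int) (c : String) (pk : List Int) (ks : List Int) : List (Int × Int × String) :=
  ks.filterMap (fun k => if pk.contains k then some (k, -i, c) else none)

def pvChunkOf (proposed : List (String × List Int)) (ip : Int × (String × List Int)) : List (Int × Int × String) :=
  match PySem.Dict.get? (PySem.Dict.mk proposed) ip.2.1 with
  | none => []
  | some pk => pvChunk ip.1 ip.2.1 pk ip.2.2

def pvTop (ks pk : List Int) : Option Int :=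
  match ks.filter (fun k => pk.contains k) with
  | [] => none
  | h :: t => some (t.foldl max h)

-- how B's step acts on one chunk whose max common key is M
def pvStepTop (i : Int) (c : String) (acc : Option (Int × Int × String)) (M : Int) : Option (Int × Int × String) :=
  match acc with
  | none => some (M, -i, c)
  | some m => if m.1 < M then some (M, -i, c) else some m

-- the relation carried through the outer induction: A's best and B's running max
-- hold the same cipher and key, and B's tuple came from a position before s
def pvRel (accA : Option (String × Int)) (accB : Option (Int × Int × String)) (s : Int) : Prop :=
  match accA, accB with
  | none, none => True
  | some a, some b => b.1 = a.2 ∧ b.2.2 = a.1 ∧ -s ≤ b.2.1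
  | _, _ => False

-- two nonempty lists with the same members have the same running max
theorem pv_runmax_eq (h1 : Int) (t1 : List Int) (h2 : Int) (t2 : List Int)
    (hmem : ∀ x : Int, x ∈ h1 :: t1 ↔ x ∈ h2 :: t2) :
    t1.foldl max h1 = t2.foldl max h2 := by
  have m1 := PySem.List.foldl_max_mem t1 h1
  have m2 := PySem.List.foldl_max_mem t2 h2
  have le1 := PySem.List.le_foldl_max t1 h1
  have le2 := PySem.List.le_foldl_max t2 h2
  apply le_antisymm
  · have hm : t1.foldl max h1 ∈ h2 :: t2 := by
      rw [← hmem]; rcases m1 with h | h <;> simp [h]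
    rcases List.mem_cons.mp hm with h | h
    · rw [h]; exact le2.1
    · exact le2.2 _ h
  · have hm : t2.foldl max h2 ∈ h1 :: t1 := by
      rw [hmem]; rcases m2 with h | h <;> simp [h]
    rcases List.mem_cons.mp hm with h | h
    · rw [h]; exact le1.1
    · exact le1.2 _ h

-- A's intersection-then-max over set(ks) & pk equals pvTop (filter with duplicates)
theorem pv_top_spec (ks pk : List Int) :
    (match PySem.Set.inter (PySem.Set.ofList ks) pk with
     | [] => (none : Option Int)
     | h :: t => some (t.foldl max h)) = pvTop ks pk := by
  have hmem : ∀ x : Int, x ∈ PySem.Set.inter (PySem.Set.ofList ks) pk ↔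
      x ∈ ks.filter (fun k => pk.contains k) := by
    intro x
    simp [PySem.Set.inter, List.mem_filter, PySem.Set.mem_ofList, PySem.Set.contains]
  unfold pvTop
  cases hi : PySem.Set.inter (PySem.Set.ofList ks) pk with
  | nil =>
    cases hf : ks.filter (fun k => pk.contains k) with
    | nil => rfl
    | cons h t =>
      exfalso
      have : h ∈ PySem.Set.inter (PySem.Set.ofList ks) pk := (hmem h).mpr (by rw [hf]; simp)
      rw [hi] at this; simp at this
  | cons h t =>
    cases hf : ks.filter (fun k => pk.contains k) with
    | nil =>
      exfalso
      have : h ∈ ks.filter (fun k => pk.contains k) := (hmem h).mp (by rw [hi]; simp)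
      rw [hf] at this; simp at this
    | cons h2 t2 =>
      simp only [Option.some.injEq]
      apply pv_runmax_eq
      intro x
      rw [← hi, ← hf]; exact hmem x

-- reduction shapes of the two step functions (used by the case analyses below)
theorem pvStepB_some (m x : Int × Int × String) :
    pvStepB (some m) x
      = if (decide (m.1 < x.1) || !decide (x.1 < m.1) && decide (m.2.1 < x.2.1)) = true
        then some x else some m := rfl

theorem pvStepTop_some (i : Int) (c : String) (m : Int × Int × String) (M : Int) :
    pvStepTop i c (some m) M = if m.1 < M then some (M, -i, c) else some m := rfl

-- B's fold over one chunk = one pvStepTop on the chunk's max common key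
theorem pv_inner (i : Int) (c : String) (pk : List Int) :
    ∀ (ks : List Int) (accB : Option (Int × Int × String)),
    (∀ m, accB = some m → -i ≤ m.2.1) →
    (pvChunk i c pk ks).foldl pvStepB accB
      = match pvTop ks pk with
        | none => accB
        | some M => pvStepTop i c accB M := by
  intro ks
  induction ks with
  | nil => intro accB _; rfl
  | cons k ks' ih =>
    intro accB hacc
    by_cases hk : k ∈ pk
    · have hchunk : pvChunk i c pk (k :: ks') = (k, -i, c) :: pvChunk i c pk ks' := by
        simp [pvChunk, hk]
      have hfilter : (k :: ks').filter (fun x => pk.contains x)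
          = k :: ks'.filter (fun x => pk.contains x) := by simp [hk]
      set accB' := pvStepB accB (k, -i, c) with haccB'
      have hacc' : ∀ m, accB' = some m → -i ≤ m.2.1 := by
        intro m hm
        rw [haccB'] at hm
        cases accB with
        | none => simp [pvStepB] at hm; rw [← hm]
        | some b =>
          rw [pvStepB_some] at hm
          split at hm
          · simp at hm; rw [← hm]
          · simp at hm; rw [← hm]; exact hacc b rfl
      rw [hchunk, List.foldl_cons, ← haccB', ih accB' hacc']
      unfold pvTop
      rw [hfilter]
      cases hf : ks'.filter (fun x => pk.contains x) with
      | nil =>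
        -- no further common keys: the chunk's max is k itself
        simp only
        cases accB with
        | none => simp [haccB', pvStepB, pvStepTop]
        | some b =>
          have hb := hacc b rfl
          rw [haccB', pvStepB_some, pvStepTop_some]
          simp only [List.foldl_nil]
          by_cases h1 : b.1 < k
          · rw [if_pos (by simp [h1]), if_pos h1]
          · rw [if_neg (by simp; omega), if_neg h1]
      | cons h' t' =>
        -- the chunk's max is max k M' where M' is the max of the rest
        simp only
        have hM : t'.foldl max (max k h') = max k (t'.foldl max h') := List.foldl_assoc
        rw [List.foldl_cons, hM]
        set M' := t'.foldl max h' with hM'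
        cases accB with
        | none =>
          have : accB' = some (k, -i, c) := haccB'
          rw [this, pvStepTop_some]
          show _ = pvStepTop i c none (max k M')
          by_cases h2 : k < M'
          · rw [if_pos h2]; show some (M', -i, c) = some (max k M', -i, c)
            rw [show max k M' = M' by omega]
          · rw [if_neg h2]; show some (k, -i, c) = some (max k M', -i, c)
            rw [show max k M' = k by omega]
        | some b =>
          have hb := hacc b rfl
          rw [haccB', pvStepB_some, pvStepTop_some]
          by_cases h1 : b.1 < k
          · rw [if_pos (by simp [h1])]
            rw [pvStepTop_some]
            rw [if_pos (by omega : b.1 < max k M')]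
            by_cases h2 : k < M'
            · rw [if_pos h2, show max k M' = M' by omega]
            · rw [if_neg h2, show max k M' = k by omega]
          · rw [if_neg (by simp; omega)]
            rw [pvStepTop_some]
            by_cases h2 : b.1 < M'
            · rw [if_pos h2, if_pos (by omega : b.1 < max k M'), show max k M' = M' by omega]
            · rw [if_neg h2, if_neg (by omega : ¬ b.1 < max k M')]
    · have hchunk : pvChunk i c pk (k :: ks') = pvChunk i c pk ks' := by
        simp [pvChunk, hk]
      have hfilter : (k :: ks').filter (fun x => pk.contains x)
          = ks'.filter (fun x => pk.contains x) := by simp [hk]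
      rw [hchunk, ih accB hacc]
      unfold pvTop
      rw [hfilter]

theorem pv_rel_mono (accA : Option (String × Int)) (accB : Option (Int × Int × String))
    (s t : Int) (hst : s ≤ t) (h : pvRel accA accB s) : pvRel accA accB t := by
  cases accA with
  | none => cases accB with
    | none => trivial
    | some b => exact absurd h (by simp [pvRel])
  | some a => cases accB with
    | none => exact absurd h (by simp [pvRel])
    | some b =>
      obtain ⟨h1, h2, h3⟩ := h
      exact ⟨h1, h2, by omega⟩

-- the outer induction over supported: A's fused fold and B's fold over the
-- flattened chunks stay related
theorem pv_outer (proposed : List (String × List Int)) :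
    ∀ (l : List (String × List Int)) (s : Int)
      (accA : Option (String × Int)) (accB : Option (Int × Int × String)),
    pvRel accA accB s →
    pvRel (l.foldl (pvS proposed) accA)
          (((PySem.List.enumerate l s).flatMap (pvChunkOf proposed)).foldl pvStepB accB)
          (s + l.length) := by
  intro l
  induction l with
  | nil => intro s accA accB h; simpa [PySem.List.enumerate] using h
  | cons p l' ih =>
    intro s accA accB h
    rw [PySem.List.enumerate_cons, List.flatMap_cons, List.foldl_append, List.foldl_cons]
    have hlen : s + ((p :: l').length : Int) = (s + 1) + (l'.length : Int) := by
      simp [List.length_cons]; ring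
    rw [hlen]
    apply ih (s + 1)
    -- one step: A's pvS vs B's fold over the chunk at position s
    obtain ⟨c, ks⟩ := p
    show pvRel (pvS proposed accA (c, ks)) ((pvChunkOf proposed (s, c, ks)).foldl pvStepB accB) (s + 1)
    unfold pvS pvChunkOf
    cases hd : PySem.Dict.get? (PySem.Dict.mk proposed) c with
    | none =>
      simp only [List.foldl_nil]
      exact pv_rel_mono _ _ _ _ (by omega) h
    | some pk =>
      simp only
      have hacc : ∀ m, accB = some m → -s ≤ m.2.1 := by
        intro m hm
        cases accA with
        | none => rw [hm] at h; exact absurd h (by simp [pvRel])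
        | some a => rw [hm] at h; exact h.2.2
      rw [pv_inner s c pk ks accB hacc]
      have htop := pv_top_spec ks pk
      cases hi : PySem.Set.inter (PySem.Set.ofList ks) pk with
      | nil =>
        rw [hi] at htop
        rw [← htop]
        exact pv_rel_mono _ _ _ _ (by omega) h
      | cons hh tt =>
        rw [hi] at htop
        rw [← htop]
        cases accA with
        | none =>
          cases accB with
          | none => exact ⟨rfl, rfl, by show -(s+1) ≤ -s; omega⟩
          | some b => exact absurd h (by simp [pvRel])
        | some a =>
          cases accB with
          | none => exact absurd h (by simp [pvRel])
          | some b =>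
            obtain ⟨h1, h2, h3⟩ := h
            show pvRel (if tt.foldl max hh > a.2 then some (c, tt.foldl max hh) else some a)
                       (pvStepTop s c (some b) (tt.foldl max hh)) (s + 1)
            rw [pvStepTop_some]
            by_cases hcmp : tt.foldl max hh > a.2
            · rw [if_pos hcmp, if_pos (by omega : b.1 < tt.foldl max hh)]
              exact ⟨rfl, rfl, by show -(s+1) ≤ -s; omega⟩
            · rw [if_neg hcmp, if_neg (by omega : ¬ b.1 < tt.foldl max hh)]
              exact ⟨h1, h2, by omega⟩

-- B's max(pairs, key=(t[0], t[1])) IS the pvStepB running fold (first lex-maximal)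
theorem pv_max2_eq (l : List (Int × Int × String)) :
    PySem.List.max2? l (fun t => t.1) (fun t => t.2.1) = l.foldl pvStepB none := by
  unfold PySem.List.max2?
  congr 1
  funext acc x
  cases acc <;> rfl

theorem pv_fold_eq (supported : List (String × List Int)) (proposed : List (String × List Int)) :
    select_cipher supported proposed = select_cipher_alt supported proposed := by
  have hA : select_cipher supported proposed
      = (supported.foldl (pvS proposed) none).getD ("", 0) := rfl
  have hB : select_cipher_alt supported proposed
      = (match PySem.List.max2? ((PySem.List.enumerate supported).flatMap (pvChunkOf proposed))
               (fun t => t.1) (fun t => t.2.1) with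
         | none => (("", 0) : String × Int)
         | some t => (t.2.2, t.1)) := rfl
  rw [pv_max2_eq] at hB
  have h := pv_outer proposed supported 0 none none trivial
  rw [hA, hB]
  cases hAres : supported.foldl (pvS proposed) none with
  | none =>
    rw [hAres] at h
    cases hBres : ((PySem.List.enumerate supported).flatMap (pvChunkOf proposed)).foldl pvStepB none with
    | none => rfl
    | some b => rw [hBres] at h; exact absurd h (by simp [pvRel])
  | some a =>
    rw [hAres] at h
    cases hBres : ((PySem.List.enumerate supported).flatMap (pvChunkOf proposed)).foldl pvStepB none with
    | none => rw [hBres] at h; exact absurd h (by simp [pvRel])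
    | some b =>
      rw [hBres] at h
      obtain ⟨h1, h2, _⟩ := h
      simp only [Option.getD_some, h1, h2]

-- ===== VERDICT (by name: the statement is the Claim_ definition above) =====
theorem select_cipher_spec : Claim_equal_select_cipher := by
  intro supported proposed _ _
  unfold Spec_select_cipher
  exact pv_fold_eq supported proposed
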